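-- pv_equiv track=rewrite | github.com/FLOCK4H/Dexter | dexter_config.py | _encode_env_value
-- ===== SOURCE A (Python) =====
-- def _encode_env_value(value: str) -> str:
--     text = str(value)
--     if not text:
--         return ""
--     if any(char.isspace() for char in text) or any(char in text for char in {'#', '"', "'", "\\"}):
--         escaped = (
--             text.replace("\\", "\\\\")
--             .replace("\n", "\\n")
--             .replace("\r", "\\r")
--             .replace("\t", "\\t")
--             .replace('"', '\\"')
--         )
--         return f'"{escaped}"'
--     return text
-- ===== SOURCE B (Python) =====
-- _ESC = {'\\': '\\\\', '\n': '\\n', '\r': '\\r', '\t': '\\t', '"': '\\"'}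
--
-- def _encode_env_value(value: str) -> str:
--     text = str(value)
--     parts = []
--     needs_quote = False
--     for ch in text:
--         parts.append(_ESC.get(ch, ch))
--         if ch.isspace() or ch in '#"\'\\':
--             needs_quote = True
--     if not text:
--         return ""
--     if needs_quote:
--         return '"' + ''.join(parts) + '"'
--     return text
-- ===== Notes on version B (the rewrite author's own statement) =====
-- stated objective: alternative
-- what changed: Replaces A's any()-scan plus five chained full-string .replace() passes with a single traversal that builds the escaped form and the needs-quote flag together from a per-character escape map; it trades the C-level replace passes for one explicit pass.
import Mathlib
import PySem

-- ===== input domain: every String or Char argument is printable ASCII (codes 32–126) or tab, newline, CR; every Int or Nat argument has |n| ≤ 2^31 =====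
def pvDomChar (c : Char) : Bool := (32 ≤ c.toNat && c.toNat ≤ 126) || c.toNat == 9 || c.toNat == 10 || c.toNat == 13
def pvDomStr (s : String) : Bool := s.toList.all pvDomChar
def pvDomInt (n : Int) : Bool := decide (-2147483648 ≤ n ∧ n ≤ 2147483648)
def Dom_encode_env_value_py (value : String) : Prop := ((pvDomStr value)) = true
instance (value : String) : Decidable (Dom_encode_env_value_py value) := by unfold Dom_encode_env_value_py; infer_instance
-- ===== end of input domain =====

-- B replaces A's any()-scan plus five chained full-string .replace() passes with one
-- traversal computing the escaped buffer and the needs-quote flag together (objective: alternative decomposition).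

-- ===== PORT A =====
def encode_env_value_py (value : String) : String :=
  let text := value
  if text.toList.isEmpty then ""
  else if (text.toList.any PySem.Chars.isspace) ||
          (['#', '"', '\'', '\\'].any (fun c => PySem.Chars.isIn [c] text.toList)) then
    let escaped :=
      PySem.Chars.replace (PySem.Chars.replace (PySem.Chars.replace (PySem.Chars.replace
        (PySem.Chars.replace text.toList ['\\'] ['\\', '\\']) ['\n'] ['\\', 'n'])
        ['\r'] ['\\', 'r']) ['\t'] ['\\', 't']) ['"'] ['\\', '"']
    String.ofList ('"' :: escaped ++ ['"'])
  else text

-- ===== PORT B =====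
-- the per-character escape map _ESC.get(ch, ch) of Source B
def pvEsc (c : Char) : List Char :=
  if c = '\\' then ['\\', '\\']
  else if c = '\n' then ['\\', 'n']
  else if c = '\r' then ['\\', 'r']
  else if c = '\t' then ['\\', 't']
  else if c = '"' then ['\\', '"']
  else [c]

-- ch.isspace() or ch in '#"\'\\'
def pvNeedsQuote (c : Char) : Bool :=
  PySem.Chars.isspace c || ['#', '"', '\'', '\\'].contains c

def encode_env_value_py_alt (value : String) : String :=
  let st := value.toList.foldl
    (fun (st : List Char × Bool) c => (st.1 ++ pvEsc c, st.2 || pvNeedsQuote c)) ([], false)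
  if value.toList.isEmpty then ""
  else if st.2 then String.ofList ('"' :: st.1 ++ ['"'])
  else value

-- ===== PRECONDITION & SPEC =====
def Spec_encode_env_value_py (value : String) (out : String) : Prop := out = encode_env_value_py_alt value
instance (value : String) (out : String) : Decidable (Spec_encode_env_value_py value out) := by unfold Spec_encode_env_value_py; infer_instance

-- ===== CLAIM (what is proved, stated in full; the proofs are below) =====
def Claim_equal_encode_env_value_py : Prop := ∀ (value : String), Dom_encode_env_value_py value → Spec_encode_env_value_py value (encode_env_value_py value)

-- ===== LEMMAS AND PROOFS =====

-- a .replace with a single-character pattern is a per-character flatMap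
theorem replace_go_single (a : Char) (r l : List Char) :
    ∀ (fuel : Nat) (acc : List Char), l.length ≤ fuel →
      PySem.Chars.replace.go [a] r fuel l acc
        = acc.reverse ++ l.flatMap (fun c => if c = a then r else [c]) := by
  induction l with
  | nil =>
      intro fuel acc _
      cases fuel <;> simp [PySem.Chars.replace.go]
  | cons c t ih =>
      intro fuel acc hf
      cases fuel with
      | zero => simp at hf
      | succ fuel =>
        by_cases hc : c = a
        · subst hc
          have hp : [c].isPrefixOf (c :: t) = true := by simp [List.isPrefixOf]
          simp only [PySem.Chars.replace.go, hp, if_true, List.length_cons, List.drop_succ_cons,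
            List.length_nil, List.drop_zero]
          rw [ih fuel (r.reverse ++ acc) (by simpa using Nat.succ_le_succ_iff.mp hf)]
          simp [List.flatMap_cons]
        · have hp : [a].isPrefixOf (c :: t) = false := by
            simp [List.isPrefixOf, Ne.symm hc]
          simp only [PySem.Chars.replace.go, hp, Bool.false_eq_true, if_false]
          rw [ih fuel (c :: acc) (by simpa using Nat.succ_le_succ_iff.mp hf)]
          simp [List.flatMap_cons, hc]

theorem replace_single (l : List Char) (a : Char) (r : List Char) :
    PySem.Chars.replace l [a] r = l.flatMap (fun c => if c = a then r else [c]) := by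
  simp only [PySem.Chars.replace, List.isEmpty_cons, Bool.false_eq_true, if_false]
  exact replace_go_single a r l l.length [] le_rfl

-- the five chained replaces collapse to one flatMap of pvEsc
theorem chain_eq_flatMap (l : List Char) :
    PySem.Chars.replace (PySem.Chars.replace (PySem.Chars.replace (PySem.Chars.replace
        (PySem.Chars.replace l ['\\'] ['\\', '\\']) ['\n'] ['\\', 'n'])
        ['\r'] ['\\', 'r']) ['\t'] ['\\', 't']) ['"'] ['\\', '"']
      = l.flatMap pvEsc := by
  simp only [replace_single, List.flatMap_assoc]
  apply List.flatMap_congr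
  intro c _
  by_cases h1 : c = '\\'; · subst h1; decide
  by_cases h2 : c = '\n'; · subst h2; decide
  by_cases h3 : c = '\r'; · subst h3; decide
  by_cases h4 : c = '\t'; · subst h4; decide
  by_cases h5 : c = '"';  · subst h5; decide
  simp [pvEsc, h1, h2, h3, h4, h5]

-- B's fold computes the flatMap of pvEsc and the any of pvNeedsQuote
theorem fold_pair (l : List Char) :
    ∀ (buf : List Char) (b : Bool),
      l.foldl (fun (st : List Char × Bool) c => (st.1 ++ pvEsc c, st.2 || pvNeedsQuote c)) (buf, b)
        = (buf ++ l.flatMap pvEsc, b || l.any pvNeedsQuote) := by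
  induction l with
  | nil => intro buf b; simp
  | cons c t ih =>
      intro buf b
      simp [List.foldl_cons, ih, Bool.or_assoc]

theorem singleton_infix_iff (a : Char) (l : List Char) : [a] <:+: l ↔ a ∈ l := by
  constructor
  · intro h; exact h.mem (by simp)
  · intro h
    obtain ⟨s, t, rfl⟩ := List.append_of_mem h
    exact ⟨s, t, by simp⟩

-- A's quote condition equals B's accumulated flag
theorem cond_eq (l : List Char) :
    (l.any PySem.Chars.isspace
      || (['#', '"', '\'', '\\'].any (fun c => PySem.Chars.isIn [c] l)))
      = l.any pvNeedsQuote := by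
  rcases Bool.eq_false_or_eq_true (l.any pvNeedsQuote) with h | h <;> rw [h]
  · simp only [List.any_eq_true, pvNeedsQuote, Bool.or_eq_true,
      List.contains_eq_mem, decide_eq_true_eq] at h
    obtain ⟨c, hc, hsp | hmem⟩ := h
    · exact Bool.or_eq_true_iff.mpr (Or.inl (List.any_eq_true.mpr ⟨c, hc, hsp⟩))
    · refine Bool.or_eq_true_iff.mpr (Or.inr (List.any_eq_true.mpr ⟨c, by simpa using hmem, ?_⟩))
      rw [PySem.Chars.isIn_iff_infix, singleton_infix_iff]
      exact hc
  · rw [Bool.or_eq_false_iff]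
    simp only [List.any_eq_false, pvNeedsQuote, Bool.or_eq_true, not_or,
      List.contains_eq_mem, decide_eq_true_eq] at h ⊢
    constructor
    · intro c hc; exact (h c hc).1
    · intro c hc
      rw [Bool.not_eq_true, PySem.Chars.isIn_eq_false_iff, singleton_infix_iff]
      intro hmem
      exact (h c hmem).2 (by simpa using hc)

-- ===== VERDICT (by name: the statement is the Claim_ definition above) =====
theorem encode_env_value_py_spec : Claim_equal_encode_env_value_py := by
  intro value _
  unfold Spec_encode_env_value_py encode_env_value_py encode_env_value_py_alt
  simp only [fold_pair, List.nil_append, Bool.false_or, chain_eq_flatMap, cond_eq]
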